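-- pv_equiv track=rewrite | github.com/amitd8/RaPidAnalytics | kfge2.py | DetectDiscovery
-- ===== SOURCE A (Python) =====
-- def printhierarchyhelper(pid,apps):
--     if pid in apps:
--         return str(printhierarchy(apps[pid][0],apps)) + " --> " + apps[pid][1]+"("+pid+")"
--
-- def printhierarchy(pid,apps):
--         return str(printhierarchyhelper(pid,apps)).replace("None --> ","")
--
-- def count_occurrences(apps, pname):
--     count = 0
--     pids = []
--     for pid, name in apps.items():
--         if name[1] == pname:
--             count += 1
--             pids.append(pid)
--     return count, pids
--
-- def DetectDiscovery(apps):
--     analysis = ""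
--     proc = ["findstr.exe","net.exe","ping.exe","nmap.exe","hostname.exe","whoami.exe"]
--     for process in proc:
--         c,pids = count_occurrences(apps,process)
--         for dis in pids:
--             h = (printhierarchy(dis,apps))
--             analysis += "   "+h+"\n"+"   (Low) Might be an attacker learning about the enviroment.(T1053) "+dis+ "\n"+"\n"
--     if analysis.strip():
--         lines = analysis.split('\n')
--         lines.insert(0, "Persistence detections:")
--         return '\n'.join(lines)
--     else:
--         return analysis
-- ===== SOURCE B (Python) =====
-- def printhierarchyhelper(pid, apps):
--     if pid in apps:
--         return str(printhierarchy(apps[pid][0], apps)) + " --> " + apps[pid][1] + "(" + pid + ")"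
--
-- def printhierarchy(pid, apps):
--     return str(printhierarchyhelper(pid, apps)).replace("None --> ", "")
--
-- def DetectDiscovery(apps):
--     proc = ["findstr.exe", "net.exe", "ping.exe", "nmap.exe", "hostname.exe", "whoami.exe"]
--     # One pass over apps builds an index name -> [pids in apps order].
--     index = {}
--     for pid, name in apps.items():
--         index.setdefault(name[1], []).append(pid)
--     # Build the report as a LIST OF LINES (no string accumulator, no strip/split at the end).
--     lines = []
--     for process in proc:
--         for dis in index.get(process, []):
--             lines.append("   " + printhierarchy(dis, apps))
--             lines.append("   (Low) Might be an attacker learning about the enviroment.(T1053) " + dis)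
--             lines.append("")
--     if lines:
--         return '\n'.join(["Persistence detections:"] + lines + [""])
--     return ""
-- ===== Notes on version B (the rewrite author's own statement) =====
-- stated objective: alternative
-- what changed: B builds a name->pids index in one pass over apps (replacing A's six per-process scans) and assembles the report as a list of lines joined once at the end, instead of A's string accumulator that is then stripped, split on newlines, header-inserted and re-joined.
import Mathlib
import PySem

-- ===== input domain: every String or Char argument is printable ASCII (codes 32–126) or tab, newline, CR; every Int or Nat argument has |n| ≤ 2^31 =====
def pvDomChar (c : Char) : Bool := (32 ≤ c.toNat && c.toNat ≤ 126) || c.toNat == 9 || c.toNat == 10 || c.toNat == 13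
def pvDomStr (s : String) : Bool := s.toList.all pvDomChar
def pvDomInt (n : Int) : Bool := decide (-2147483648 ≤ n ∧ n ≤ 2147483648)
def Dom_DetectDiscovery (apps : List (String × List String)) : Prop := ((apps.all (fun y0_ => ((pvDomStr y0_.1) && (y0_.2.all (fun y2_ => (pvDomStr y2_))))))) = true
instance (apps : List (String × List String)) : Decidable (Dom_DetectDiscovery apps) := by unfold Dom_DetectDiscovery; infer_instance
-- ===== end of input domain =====

-- B builds a name->pids index in ONE pass over apps and assembles the report as a list of
-- lines joined once at the end, instead of A's six per-process scans feeding a string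
-- accumulator that is then stripped, split, header-inserted and re-joined; return-value
-- equivalence proved on Pre_.


-- ===== PORT A =====
-- str(x) for x = printhierarchyhelper's result: None -> "None", a str -> itself
def pyStrOpt : Option String → String
  | none => "None"
  | some s => s

-- printhierarchyhelper / printhierarchy (shared verbatim by A and B in Python).
-- Python's recursion follows the parent chain; here it carries fuel, and fuel 0 returns
-- none (only reachable on non-terminating chains, which Pre_ excludes).
def phh : Nat → String → List (String × List String) → Option String
  | 0, _, _ => none
  | (n+1), pid, apps =>
    match (PySem.Dict.mk apps).get? pid with
    | some v =>
        some (PySem.Str.replace (pyStrOpt (phh n (PySem.List.pyGetD v 0 "") apps)) "None --> " ""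
              ++ " --> " ++ PySem.List.pyGetD v 1 "" ++ "(" ++ pid ++ ")")
    | none => none

def printhierarchy (fuel : Nat) (pid : String) (apps : List (String × List String)) : String :=
  PySem.Str.replace (pyStrOpt (phh fuel pid apps)) "None --> " ""

def count_occurrences (apps : List (String × List String)) (pname : String) : Int × List String :=
  apps.foldl
    (fun (acc : Int × List String) kv =>
      if PySem.List.pyGetD kv.2 1 "" == pname then (acc.1 + 1, acc.2 ++ [kv.1]) else acc)
    (0, [])

def DetectDiscovery (apps : List (String × List String)) : String :=
  let proc := ["findstr.exe", "net.exe", "ping.exe", "nmap.exe", "hostname.exe", "whoami.exe"]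
  let analysis :=
    proc.foldl
      (fun analysis process =>
        let cp := count_occurrences apps process
        cp.2.foldl
          (fun analysis dis =>
            let h := printhierarchy (apps.length + 1) dis apps
            analysis ++ "   " ++ h ++ "\n"
              ++ "   (Low) Might be an attacker learning about the enviroment.(T1053) " ++ dis
              ++ "\n" ++ "\n")
          analysis)
      ""
  if PySem.Str.strip analysis ≠ "" then
    let lines := (PySem.Str.split? analysis "\n").getD []
    let lines := PySem.List.insert lines 0 "Persistence detections:"
    PySem.Str.join "\n" lines
  else
    analysis

-- ===== PORT B =====
-- one pass over apps: index.setdefault(name[1], []).append(pid)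
def buildIndex (apps : List (String × List String)) : PySem.Dict String (List String) :=
  apps.foldl
    (fun d kv => d.modify (PySem.List.pyGetD kv.2 1 "") [] (fun l => l ++ [kv.1]))
    PySem.Dict.empty

def DetectDiscovery_alt (apps : List (String × List String)) : String :=
  let proc := ["findstr.exe", "net.exe", "ping.exe", "nmap.exe", "hostname.exe", "whoami.exe"]
  let index := buildIndex apps
  let lines :=
    proc.foldl
      (fun ls process =>
        (index.getD process []).foldl
          (fun ls dis =>
            ls ++ ["   " ++ printhierarchy (apps.length + 1) dis apps,
                   "   (Low) Might be an attacker learning about the enviroment.(T1053) " ++ dis,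
                   ""])
          ls)
      []
  if lines ≠ [] then
    PySem.Str.join "\n" (["Persistence detections:"] ++ lines ++ [""])
  else
    ""

-- ===== PRECONDITION & SPEC =====
-- one step up the parent chain: pid -> apps[pid][0] (identity once outside the dict)
def pvStep (apps : List (String × List String)) (pid : String) : String :=
  match (PySem.Dict.mk apps).get? pid with
  | some v => v.getD 0 ""
  | none => pid

-- Pre_ excludes exactly the inputs where Python A raises: an entry whose value list has
-- fewer than 2 elements (IndexError on name[1]), or a watched process whose parent-pid
-- chain never leaves the dict (unbounded recursion in printhierarchy); it also requires
-- distinct pids, since the argument models a Python dict, whose keys are unique.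
def Pre_DetectDiscovery (apps : List (String × List String)) : Prop :=
  (apps.map Prod.fst).Nodup ∧
  (∀ kv ∈ apps, 2 ≤ kv.2.length) ∧
  (∀ kv ∈ apps,
    PySem.List.pyGetD kv.2 1 "" ∈
      ["findstr.exe", "net.exe", "ping.exe", "nmap.exe", "hostname.exe", "whoami.exe"] →
    (PySem.Dict.mk apps).contains ((pvStep apps)^[apps.length] kv.1) = false)
instance (apps : List (String × List String)) : Decidable (Pre_DetectDiscovery apps) := by
  unfold Pre_DetectDiscovery; infer_instance

def pvWitness_DetectDiscovery : (List (String × List String)) :=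
  [("7", ["0", "findstr.exe"]), ("3", ["7", "cmd.exe"])]

def Spec_DetectDiscovery (apps : List (String × List String)) (out : String) : Prop := out = DetectDiscovery_alt apps
instance (apps : List (String × List String)) (out : String) : Decidable (Spec_DetectDiscovery apps out) := by unfold Spec_DetectDiscovery; infer_instance

-- ===== CLAIM (what is proved, stated in full; the proofs are below) =====
def Claim_equal_DetectDiscovery : Prop := ∀ (apps : List (String × List String)), Dom_DetectDiscovery apps → Pre_DetectDiscovery apps → Spec_DetectDiscovery apps (DetectDiscovery apps)

-- ===== LEMMAS AND PROOFS =====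

-- abbreviations used only by the proofs
def pvProc : List String :=
  ["findstr.exe", "net.exe", "ping.exe", "nmap.exe", "hostname.exe", "whoami.exe"]

def pvLineA (apps : List (String × List String)) (d : String) : String :=
  "   " ++ printhierarchy (apps.length + 1) d apps

def pvLineB (d : String) : String :=
  "   (Low) Might be an attacker learning about the enviroment.(T1053) " ++ d

def pvBlockC (apps : List (String × List String)) (d : String) : List Char :=
  (pvLineA apps d).toList ++ ['\n'] ++ (pvLineB d).toList ++ ['\n'] ++ ['\n']

def pvPids (apps : List (String × List String)) : List String :=
  pvProc.flatMap (fun p => (apps.filter (fun kv => PySem.List.pyGetD kv.2 1 "" == p)).map Prod.fst)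

def pvCanon (apps : List (String × List String)) : String :=
  if pvPids apps = [] then ""
  else String.ofList (("Persistence detections:".toList) ++ ['\n'] ++
         (pvPids apps).flatMap (pvBlockC apps))

-- A's per-process scan, characterised: the pids are apps' keys with matching name, in order
theorem count_occurrences_snd (apps : List (String × List String)) (pname : String) :
    (count_occurrences apps pname).2 =
      (apps.filter (fun kv => PySem.List.pyGetD kv.2 1 "" == pname)).map Prod.fst := by
  unfold count_occurrences
  suffices h : ∀ (l : List (String × List String)) (c : Int) (ps : List String),
      (l.foldl
        (fun (acc : Int × List String) kv =>
          if PySem.List.pyGetD kv.2 1 "" == pname then (acc.1 + 1, acc.2 ++ [kv.1]) else acc)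
        (c, ps)).2 =
      ps ++ (l.filter (fun kv => PySem.List.pyGetD kv.2 1 "" == pname)).map Prod.fst by
    simpa using h apps 0 []
  intro l
  induction l with
  | nil => intro c ps; simp
  | cons kv t ih =>
      intro c ps
      rw [List.foldl_cons]
      by_cases hk : (PySem.List.pyGetD kv.2 1 "" == pname) = true
      · rw [if_pos hk, ih]
        simp [hk]
      · rw [if_neg hk, ih]
        simp only [Bool.not_eq_true] at hk
        simp [hk]

-- B's index, characterised: lookup of a name gives exactly the same pid list
theorem buildIndex_getD (apps : List (String × List String)) (pname : String) :
    (buildIndex apps).getD pname [] =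
      (apps.filter (fun kv => PySem.List.pyGetD kv.2 1 "" == pname)).map Prod.fst := by
  unfold buildIndex
  have h := PySem.Dict.getD_foldl_modify_append
    (apps.map (fun kv => (PySem.List.pyGetD kv.2 1 "", kv.1)))
    (PySem.Dict.empty : PySem.Dict String (List String)) pname
  rw [List.foldl_map] at h
  simp only [h, PySem.Dict.getD_empty, List.nil_append, List.filter_map, List.map_map]
  rfl

-- intercalate basics
theorem ic_cons_cons (sep a b : List Char) (l : List (List Char)) :
    sep.intercalate (a :: b :: l) = a ++ sep ++ sep.intercalate (b :: l) := by
  simp [List.intercalate, List.intersperse]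

theorem ic_append_pair (sep a b : List Char) (xs : List (List Char)) :
    sep.intercalate (xs ++ [a, b]) = sep.intercalate (xs ++ [a ++ sep ++ b]) := by
  induction xs with
  | nil => simp [List.intercalate, List.append_assoc]
  | cons x t ih =>
      cases t with
      | nil => simp only [List.nil_append] at ih
               simp [List.intercalate]
      | cons y u => simp only [List.cons_append, ic_cons_cons] at *; rw [ih]

-- the splitter's accumulator invariant: re-joining gives back the remaining input
theorem go_intercalate (sep : List Char) :
    ∀ (fuel : Nat) (l cur : List Char) (acc : List (List Char)),
      sep.intercalate (PySem.Chars.splitOn.go sep fuel l cur acc) =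
        sep.intercalate (acc.reverse ++ [cur.reverse ++ l]) := by
  intro fuel
  induction fuel with
  | zero => intro l cur acc; simp [PySem.Chars.splitOn.go]
  | succ n ih =>
      intro l cur acc
      cases l with
      | nil => simp [PySem.Chars.splitOn.go]
      | cons c rest =>
          rw [PySem.Chars.splitOn.go]
          by_cases hp : sep.isPrefixOf (c :: rest) = true
          · rw [if_pos hp, ih]
            obtain ⟨t, ht⟩ := List.isPrefixOf_iff_prefix.mp hp
            have hdrop : (c :: rest).drop sep.length = t := by
              rw [← ht]; simp
            rw [hdrop, ← ht]
            have : (cur.reverse :: acc).reverse = acc.reverse ++ [cur.reverse] := by simp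
            rw [this, List.append_assoc]
            have := ic_append_pair sep cur.reverse t acc.reverse
            simpa [List.append_assoc] using this
          · rw [if_neg hp, ih]
            simp [List.append_assoc]

theorem join_splitOn (s sep : List Char) :
    PySem.Chars.join sep (PySem.Chars.splitOn s sep) = s := by
  unfold PySem.Chars.join PySem.Chars.splitOn
  rw [go_intercalate]
  simp [List.intercalate]

theorem go_ne_nil (sep : List Char) :
    ∀ (fuel : Nat) (l cur : List Char) (acc : List (List Char)),
      PySem.Chars.splitOn.go sep fuel l cur acc ≠ [] := by
  intro fuel
  induction fuel with
  | zero => intro l cur acc; simp [PySem.Chars.splitOn.go]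
  | succ n ih =>
      intro l cur acc
      cases l with
      | nil => simp [PySem.Chars.splitOn.go]
      | cons c rest =>
          rw [PySem.Chars.splitOn.go]
          by_cases hp : sep.isPrefixOf (c :: rest) = true
          · rw [if_pos hp]; exact ih _ _ _
          · rw [if_neg hp]; exact ih _ _ _

theorem splitOn_ne_nil (s sep : List Char) : PySem.Chars.splitOn s sep ≠ [] :=
  go_ne_nil sep _ s [] []

theorem join_cons_of_ne_nil (sep x : List Char) (xs : List (List Char)) (h : xs ≠ []) :
    PySem.Chars.join sep (x :: xs) = x ++ sep ++ PySem.Chars.join sep xs := by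
  cases xs with
  | nil => exact absurd rfl h
  | cons y t => exact ic_cons_cons sep x y t

-- strip is empty exactly when everything is whitespace
theorem strip_eq_nil_iff (s : List Char) :
    PySem.Chars.strip s = [] ↔ ∀ c ∈ s, PySem.Chars.isspace c = true := by
  unfold PySem.Chars.strip PySem.Chars.rstrip PySem.Chars.lstrip
  rw [List.reverse_eq_nil_iff, List.dropWhile_eq_nil_iff]
  constructor
  · intro h c hc
    have hsplit : List.takeWhile PySem.Chars.isspace s ++ List.dropWhile PySem.Chars.isspace s = s :=
      List.takeWhile_append_dropWhile
    rw [← hsplit] at hc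
    rcases List.mem_append.mp hc with h1 | h2
    · exact List.mem_takeWhile_imp h1
    · exact h c (List.mem_reverse.mpr h2)
  · intro h c hc
    exact h c ((List.dropWhile_suffix _).subset (List.mem_reverse.mp hc))

-- A's inner accumulation, flattened to one list of blocks
theorem foldlA_toList (apps : List (String × List String)) :
    ∀ (P : List String) (s : String),
      (P.foldl
        (fun analysis dis =>
          analysis ++ "   " ++ printhierarchy (apps.length + 1) dis apps ++ "\n"
            ++ "   (Low) Might be an attacker learning about the enviroment.(T1053) " ++ dis
            ++ "\n" ++ "\n")
        s).toList = s.toList ++ P.flatMap (pvBlockC apps) := by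
  intro P
  induction P with
  | nil => intro s; simp
  | cons d t ih =>
      intro s
      rw [List.foldl_cons, ih]
      simp [pvBlockC, pvLineA, pvLineB, String.toList_append, List.append_assoc]

-- B's inner accumulation, flattened to one list of lines
theorem foldlB_lines (apps : List (String × List String)) :
    ∀ (P : List String) (ls : List String),
      (P.foldl
        (fun ls dis =>
          ls ++ ["   " ++ printhierarchy (apps.length + 1) dis apps,
                 "   (Low) Might be an attacker learning about the enviroment.(T1053) " ++ dis,
                 ""])
        ls) = ls ++ P.flatMap (fun d => [pvLineA apps d, pvLineB d, ""]) := by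
  intro P
  induction P with
  | nil => intro ls; simp
  | cons d t ih =>
      intro ls
      rw [List.foldl_cons, ih]
      simp [pvLineA, pvLineB, List.append_assoc]

-- joining B's line list reproduces the concatenated blocks
theorem join_lines_eq_blocks (apps : List (String × List String)) :
    ∀ (P : List String),
      PySem.Chars.join ['\n']
        (((P.flatMap (fun d => [pvLineA apps d, pvLineB d, ""])).map String.toList) ++ [[]]) =
      P.flatMap (pvBlockC apps) := by
  intro P
  induction P with
  | nil => simp [PySem.Chars.join, List.intercalate]
  | cons d t ih =>
      simp only [List.flatMap_cons, List.map_cons,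
        List.cons_append, List.nil_append,
        show ("" : String).toList = [] from by decide]
      rw [join_cons_of_ne_nil _ _ _ (by simp), join_cons_of_ne_nil _ _ _ (by simp),
          join_cons_of_ne_nil _ _ _ (by simp), ih]
      simp [pvBlockC, List.append_assoc]

-- A's port equals the canonical result
set_option maxHeartbeats 1000000 in
theorem A_eq_canon (apps : List (String × List String)) :
    DetectDiscovery apps = pvCanon apps := by
  have hana :
      (["findstr.exe", "net.exe", "ping.exe", "nmap.exe", "hostname.exe", "whoami.exe"].foldl
        (fun analysis process =>
          ((count_occurrences apps process).2).foldl
            (fun analysis dis =>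
              analysis ++ "   " ++ printhierarchy (apps.length + 1) dis apps ++ "\n"
                ++ "   (Low) Might be an attacker learning about the enviroment.(T1053) " ++ dis
                ++ "\n" ++ "\n")
            analysis)
        "") = String.ofList ((pvPids apps).flatMap (pvBlockC apps)) := by
    rw [← List.foldl_flatMap]
    have h2 : ["findstr.exe", "net.exe", "ping.exe", "nmap.exe", "hostname.exe",
        "whoami.exe"].flatMap (fun p => (count_occurrences apps p).2) = pvPids apps := by
      unfold pvPids pvProc; simp [count_occurrences_snd]
    rw [h2]
    have ht := foldlA_toList apps (pvPids apps) ""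
    have := congrArg String.ofList ht
    simpa using this
  simp only [DetectDiscovery]
  rw [hana]
  cases hP : pvPids apps with
  | nil =>
      rw [if_neg (by simp [PySem.Str.strip, PySem.Chars.strip, PySem.Chars.lstrip,
        PySem.Chars.rstrip])]
      simp [pvCanon, hP]
  | cons d t =>
      have hcond : PySem.Str.strip (String.ofList (List.flatMap (pvBlockC apps) (d :: t))) ≠ "" := by
        simp only [PySem.Str.strip, String.toList_ofList]
        intro h
        have hnil : PySem.Chars.strip (List.flatMap (pvBlockC apps) (d :: t)) = [] := by
          have := congrArg String.toList h
          simpa using this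
        rw [strip_eq_nil_iff] at hnil
        have hparen : '(' ∈ List.flatMap (pvBlockC apps) (d :: t) := by
          have hin : '(' ∈ (pvLineB d).toList := by
            simp only [pvLineB, String.toList_append, List.mem_append]
            left; decide
          simp only [List.flatMap_cons, pvBlockC, List.append_assoc, List.mem_append]
          tauto
        have := hnil '(' hparen
        exact absurd this (by decide)
      rw [if_pos hcond]
      simp only [PySem.Str.split?, PySem.Str.join, String.toList_ofList,
        show ("\n" : String).toList = ['\n'] from by decide]
      rw [show PySem.Chars.split? (List.flatMap (pvBlockC apps) (d :: t)) ['\n'] =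
            some (PySem.Chars.splitOn (List.flatMap (pvBlockC apps) (d :: t)) ['\n']) from by
          simp [PySem.Chars.split?]]
      simp only [Option.map_some, Option.getD_some, PySem.List.insert_zero]
      unfold pvCanon
      rw [if_neg (by simp [hP])]
      rw [hP]
      simp only [List.map_cons, List.map_map]
      have hmap : (String.toList ∘ String.ofList) = (id : List Char → List Char) := by
        funext l; simp
      rw [hmap, List.map_id, join_cons_of_ne_nil _ _ _ (splitOn_ne_nil _ _), join_splitOn]

-- B's port equals the canonical result
set_option maxHeartbeats 1000000 in
theorem B_eq_canon (apps : List (String × List String)) :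
    DetectDiscovery_alt apps = pvCanon apps := by
  have hflat :
      (["findstr.exe", "net.exe", "ping.exe", "nmap.exe", "hostname.exe", "whoami.exe"].foldl
        (fun ls process =>
          ((buildIndex apps).getD process []).foldl
            (fun ls dis =>
              ls ++ ["   " ++ printhierarchy (apps.length + 1) dis apps,
                     "   (Low) Might be an attacker learning about the enviroment.(T1053) " ++ dis,
                     ""])
            ls)
        []) = (pvPids apps).flatMap (fun d => [pvLineA apps d, pvLineB d, ""]) := by
    rw [← List.foldl_flatMap, foldlB_lines]
    unfold pvPids pvProc
    simp [buildIndex_getD]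
  simp only [DetectDiscovery_alt]
  rw [hflat]
  cases hP : pvPids apps with
  | nil =>
      simp [pvCanon, hP]
  | cons d t =>
      have hne : List.flatMap (fun d => [pvLineA apps d, pvLineB d, ""]) (d :: t) ≠ [] := by simp
      rw [if_pos hne]
      unfold pvCanon
      rw [hP, if_neg (by simp)]
      simp only [PySem.Str.join]
      congr 1
      simp only [List.cons_append, List.map_cons, List.map_append, List.map_nil,
        show ("\n" : String).toList = ['\n'] from by decide,
        show ("" : String).toList = [] from by decide]
      rw [join_cons_of_ne_nil _ _ _ (by simp)]
      simp only [List.nil_append]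
      rw [join_lines_eq_blocks apps (d :: t)]

-- ===== VERDICT (by name: the statement is the Claim_ definition above) =====
theorem DetectDiscovery_spec : Claim_equal_DetectDiscovery := by
  intro apps _ _
  unfold Spec_DetectDiscovery
  rw [A_eq_canon, B_eq_canon]
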